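-- pv_equiv track=rewrite | github.com/fruch/coodie | src/coodie/cql_builder.py | parse_filter_kwargs
-- ===== SOURCE A (Python) =====
-- from typing import Any
--
-- def parse_filter_kwargs(
--     kwargs: dict[str, Any],
-- ) -> list[tuple[str, str, Any]]:
--     operators = {
--         "gt": ">",
--         "gte": ">=",
--         "lt": "<",
--         "lte": "<=",
--         "in": "IN",
--         "contains": "CONTAINS",
--         "contains_key": "CONTAINS KEY",
--         "like": "LIKE",
--         "ne": "!=",
--         "isnull": "ISNULL",
--     }
--     token_operators = {
--         "token__gt": "TOKEN >",
--         "token__gte": "TOKEN >=",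
--         "token__lt": "TOKEN <",
--         "token__lte": "TOKEN <=",
--     }
--     result = []
--     for key, value in kwargs.items():
--         parts2 = key.rsplit("__", 2)
--         if len(parts2) == 3:
--             col, mid, op = parts2
--             token_key = f"{mid}__{op}"
--             if token_key in token_operators:
--                 result.append((col, token_operators[token_key], value))
--                 continue
--         parts = key.rsplit("__", 1)
--         if len(parts) == 2 and parts[1] in operators:
--             col, op_key = parts
--             result.append((col, operators[op_key], value))
--         else:
--             result.append((key, "=", value))
--     return result
-- ===== SOURCE B (Python) =====
-- # Suffix-table re-implementation: one ordered list of (suffix, operator) patterns,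
-- # first endswith match wins; replaces the two rsplit passes.
-- _PATTERNS = [
--     ("__token__gt", "TOKEN >"),
--     ("__token__gte", "TOKEN >="),
--     ("__token__lt", "TOKEN <"),
--     ("__token__lte", "TOKEN <="),
--     ("__gt", ">"),
--     ("__gte", ">="),
--     ("__lt", "<"),
--     ("__lte", "<="),
--     ("__in", "IN"),
--     ("__contains_key", "CONTAINS KEY"),
--     ("__contains", "CONTAINS"),
--     ("__like", "LIKE"),
--     ("__ne", "!="),
--     ("__isnull", "ISNULL"),
-- ]
--
--
-- def parse_filter_kwargs(kwargs):
--     result = []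
--     for key, value in kwargs.items():
--         for suffix, op in _PATTERNS:
--             if key.endswith(suffix):
--                 result.append((key[: len(key) - len(suffix)], op, value))
--                 break
--         else:
--             result.append((key, "=", value))
--     return result
-- ===== Notes on version B (the rewrite author's own statement) =====
-- stated objective: simpler
-- what changed: Replaces A's two rsplit('__',2)/rsplit('__',1) passes with dict membership tests by a single ordered suffix table (token patterns first) scanned with str.endswith, taking the first matching suffix and slicing it off.
import Mathlib
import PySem

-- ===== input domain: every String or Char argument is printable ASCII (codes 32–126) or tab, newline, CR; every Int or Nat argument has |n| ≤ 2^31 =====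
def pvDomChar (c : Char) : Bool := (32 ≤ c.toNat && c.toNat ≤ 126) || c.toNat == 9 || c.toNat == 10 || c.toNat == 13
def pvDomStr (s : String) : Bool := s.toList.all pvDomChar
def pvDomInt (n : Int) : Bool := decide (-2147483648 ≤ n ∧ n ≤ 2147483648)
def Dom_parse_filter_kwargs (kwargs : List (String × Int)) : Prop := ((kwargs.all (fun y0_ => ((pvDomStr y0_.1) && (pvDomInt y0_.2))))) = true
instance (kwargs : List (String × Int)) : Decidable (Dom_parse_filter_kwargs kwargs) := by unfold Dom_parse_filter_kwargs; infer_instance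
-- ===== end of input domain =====

-- B re-implements A's two rsplit passes as one ordered suffix-table scan (objective: a simpler decomposition; no speed claim).

-- ===== PORT A =====
-- Hand port of key.rsplit("__", 1) (PySem has no rsplit; sep is A's literal "__"):
-- split at the RIGHTMOST occurrence of "__", or [cs] if "__" does not occur. Exact for this nonempty separator.
def pvRsplit1 (cs : List Char) : List (List Char) :=
  match cs with
  | [] => [[]]
  | c :: rest =>
    match pvRsplit1 rest with
    | [l, r] => [c :: l, r]
    | _ => if (['_', '_'] : List Char).isPrefixOf (c :: rest) then [[], (c :: rest).drop 2] else [c :: rest]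

-- Hand port of key.rsplit("__", 2): one more split, on the left piece, of the maxsplit=1 result.
def pvRsplit2 (cs : List Char) : List (List Char) :=
  match pvRsplit1 cs with
  | [l, r] =>
    (match pvRsplit1 l with
     | [a, b] => [a, b, r]
     | _ => [l, r])
  | _ => [cs]

-- A's literal dicts, as association lists (dict → assoc list, lookup = first match).
def pvOperatorsA : List (List Char × String) :=
  [("gt".toList, ">"), ("gte".toList, ">="), ("lt".toList, "<"), ("lte".toList, "<="),
   ("in".toList, "IN"), ("contains".toList, "CONTAINS"), ("contains_key".toList, "CONTAINS KEY"),
   ("like".toList, "LIKE"), ("ne".toList, "!="), ("isnull".toList, "ISNULL")]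

def pvTokenOperatorsA : List (List Char × String) :=
  [("token__gt".toList, "TOKEN >"), ("token__gte".toList, "TOKEN >="),
   ("token__lt".toList, "TOKEN <"), ("token__lte".toList, "TOKEN <=")]

-- the body of A's loop after the token branch fell through: parts = key.rsplit("__", 1); …
def pvRowAPlain (key : List Char) : List Char × String :=
  match pvRsplit1 key with
  | [col, opk] =>
    (match pvOperatorsA.lookup opk with
     | some o => (col, o)
     | none => (key, "="))
  | _ => (key, "=")

-- the body of A's loop for one key: parts2 = key.rsplit("__", 2); token branch, else plain branch
def pvRowA (key : List Char) : List Char × String :=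
  match pvRsplit2 key with
  | [col, mid, op] =>
    (match pvTokenOperatorsA.lookup (mid ++ ['_', '_'] ++ op) with
     | some o => (col, o)
     | none => pvRowAPlain key)
  | _ => pvRowAPlain key

def parse_filter_kwargs (kwargs : List (String × Int)) : List (String × String × Int) :=
  match kwargs with
  | [] => []
  | (key, value) :: rest =>
    let co := pvRowA key.toList
    (String.ofList co.1, co.2, value) :: parse_filter_kwargs rest

-- ===== PORT B =====
def pvPatternsB : List (List Char × String) :=
  [("__token__gt".toList, "TOKEN >"), ("__token__gte".toList, "TOKEN >="),
   ("__token__lt".toList, "TOKEN <"), ("__token__lte".toList, "TOKEN <="),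
   ("__gt".toList, ">"), ("__gte".toList, ">="), ("__lt".toList, "<"), ("__lte".toList, "<="),
   ("__in".toList, "IN"), ("__contains_key".toList, "CONTAINS KEY"), ("__contains".toList, "CONTAINS"),
   ("__like".toList, "LIKE"), ("__ne".toList, "!="), ("__isnull".toList, "ISNULL")]

-- B's inner for/break/else loop: first pattern with key.endswith(suffix) wins
def pvRowB (pats : List (List Char × String)) (key : List Char) : List Char × String :=
  match pats with
  | [] => (key, "=")
  | (suf, op) :: rest =>
    if PySem.Chars.endswith key suf then (key.take (key.length - suf.length), op)
    else pvRowB rest key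

def parse_filter_kwargs_alt (kwargs : List (String × Int)) : List (String × String × Int) :=
  match kwargs with
  | [] => []
  | (key, value) :: rest =>
    let co := pvRowB pvPatternsB key.toList
    (String.ofList co.1, co.2, value) :: parse_filter_kwargs_alt rest

-- ===== PRECONDITION & SPEC =====
def Spec_parse_filter_kwargs (kwargs : List (String × Int)) (out : List (String × String × Int)) : Prop := out = parse_filter_kwargs_alt kwargs
instance (kwargs : List (String × Int)) (out : List (String × String × Int)) : Decidable (Spec_parse_filter_kwargs kwargs out) := by unfold Spec_parse_filter_kwargs; infer_instance

-- ===== CLAIM (what is proved, stated in full; the proofs are below) =====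
def Claim_equal_parse_filter_kwargs : Prop := ∀ (kwargs : List (String × Int)), Dom_parse_filter_kwargs kwargs → Spec_parse_filter_kwargs kwargs (parse_filter_kwargs kwargs)

-- ===== LEMMAS AND PROOFS =====

-- a prefix of a drop is an infix
theorem pv_infix_of_prefix_drop {sep l : List Char} {n : Nat} (h : sep <+: l.drop n) : sep <:+: l :=
  h.isInfix.trans (List.drop_suffix n l).isInfix

-- pvRsplit1 on a string without "__": the singleton
theorem pvRsplit1_no_sep {cs : List Char} (h : ¬ (['_', '_'] : List Char) <:+: cs) :
    pvRsplit1 cs = [cs] := by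
  induction cs with
  | nil => rfl
  | cons c rest ih =>
    have hr : ¬ (['_', '_'] : List Char) <:+: rest := fun hx => h (List.infix_cons_iff.mpr (Or.inr hx))
    have hp : ¬ (['_', '_'] : List Char) <+: (c :: rest) := fun hx => h hx.isInfix
    rw [pvRsplit1, ih hr]
    simp [List.isPrefixOf_iff_prefix, hp]

-- pvRsplit1 on a string containing "__": some pair
theorem pvRsplit1_pair {cs : List Char} (h : (['_', '_'] : List Char) <:+: cs) :
    ∃ l r, pvRsplit1 cs = [l, r] := by
  induction cs with
  | nil => simp at h
  | cons c rest ih =>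
    by_cases hr : (['_', '_'] : List Char) <:+: rest
    · obtain ⟨l, r, hlr⟩ := ih hr
      exact ⟨c :: l, r, by rw [pvRsplit1, hlr]⟩
    · have hp : (['_', '_'] : List Char) <+: (c :: rest) :=
        (List.infix_cons_iff.mp h).resolve_right hr
      rw [pvRsplit1, pvRsplit1_no_sep hr]
      refine ⟨[], (c :: rest).drop 2, ?_⟩
      rw [if_pos (List.isPrefixOf_iff_prefix.mpr hp)]

-- the pair returned by pvRsplit1 is the decomposition at the RIGHTMOST "__"
theorem pvRsplit1_spec {cs l r : List Char} (h : pvRsplit1 cs = [l, r]) :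
    cs = l ++ ['_', '_'] ++ r ∧ ¬ (['_', '_'] : List Char) <:+: ('_' :: r) := by
  induction cs generalizing l r with
  | nil => simp [pvRsplit1] at h
  | cons c rest ih =>
    by_cases hr : (['_', '_'] : List Char) <:+: rest
    · obtain ⟨l', r', hlr⟩ := pvRsplit1_pair hr
      rw [pvRsplit1, hlr] at h
      have hl : l = c :: l' := by injection h with h1 _; exact h1.symm
      have hr2 : r = r' := by
        injection h with _ h2; injection h2 with h3 _; exact h3.symm
      obtain ⟨hdec, hcond⟩ := ih hlr
      subst hl; subst hr2
      refine ⟨?_, hcond⟩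
      rw [hdec]; simp
    · rw [pvRsplit1, pvRsplit1_no_sep hr] at h
      by_cases hp : (['_', '_'] : List Char) <+: (c :: rest)
      · rw [if_pos (List.isPrefixOf_iff_prefix.mpr hp)] at h
        obtain ⟨t, ht⟩ := hp
        have hct : c :: rest = '_' :: '_' :: t := ht.symm
        have hl : l = [] := by injection h with h1 _; exact h1.symm
        have hr2 : r = t := by
          injection h with _ h2; injection h2 with h3 _
          rw [← h3, hct]
          rfl
        have hrt : rest = '_' :: t := (List.cons_eq_cons.mp hct).2
        subst hl; subst hr2
        exact ⟨by simpa using hct, by rw [← hrt]; exact hr⟩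
      · rw [if_neg (by simpa [List.isPrefixOf_iff_prefix] using hp)] at h
        simp at h

-- uniqueness of the rightmost decomposition
theorem pvRightmost_unique {x1 y1 x2 y2 : List Char}
    (h : x1 ++ ['_', '_'] ++ y1 = x2 ++ ['_', '_'] ++ y2)
    (h1 : ¬ (['_', '_'] : List Char) <:+: ('_' :: y1))
    (h2 : ¬ (['_', '_'] : List Char) <:+: ('_' :: y2)) :
    x1 = x2 ∧ y1 = y2 := by
  have key : ∀ a1 b1 a2 b2 : List Char, a1 ++ ['_', '_'] ++ b1 = a2 ++ ['_', '_'] ++ b2 →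
      ¬ (['_', '_'] : List Char) <:+: ('_' :: b1) → a1.length < a2.length → False := by
    intro a1 b1 a2 b2 heq hc hlt
    apply hc
    have hd1 : (a1 ++ ['_', '_'] ++ b1).drop (a1.length + 1) = '_' :: b1 := by
      rw [List.append_assoc, List.drop_append]
      simp
    have hd2 : (a2 ++ ['_', '_'] ++ b2).drop a2.length = '_' :: '_' :: b2 := by
      rw [List.append_assoc]
      exact List.drop_left
    have hd2' : List.drop a2.length (a1 ++ ['_', '_'] ++ b1) = '_' :: '_' :: b2 := by
      rw [heq]; exact hd2
    have hsplit : List.drop a2.length (a1 ++ ['_', '_'] ++ b1)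
        = List.drop (a2.length - (a1.length + 1)) ('_' :: b1) := by
      rw [← hd1, List.drop_drop]
      congr 1
      omega
    have hpre : (['_', '_'] : List Char) <+: ('_' :: b1).drop (a2.length - (a1.length + 1)) := by
      rw [← hsplit, hd2']
      exact ⟨b2, rfl⟩
    exact pv_infix_of_prefix_drop hpre
  rcases Nat.lt_trichotomy x1.length x2.length with hlt | heqn | hgt
  · exact (key x1 y1 x2 y2 h h1 hlt).elim
  · have h' : x1 ++ (['_', '_'] ++ y1) = x2 ++ (['_', '_'] ++ y2) := by
      simpa [List.append_assoc] using h
    obtain ⟨hx, hy⟩ := List.append_inj h' heqn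
    exact ⟨hx, by simpa using hy⟩
  · exact (key x2 y2 x1 y1 h.symm h2 hgt).elim

-- forward form: a decomposition with nothing to its right IS what pvRsplit1 returns
theorem pvRsplit1_of_decomp {cs l r : List Char}
    (hdec : cs = l ++ ['_', '_'] ++ r) (hc : ¬ (['_', '_'] : List Char) <:+: ('_' :: r)) :
    pvRsplit1 cs = [l, r] := by
  have hin : (['_', '_'] : List Char) <:+: cs := ⟨l, r, hdec.symm⟩
  obtain ⟨l', r', hlr⟩ := pvRsplit1_pair hin
  obtain ⟨hdec', hc'⟩ := pvRsplit1_spec hlr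
  have hdd : l' ++ ['_', '_'] ++ r' = l ++ ['_', '_'] ++ r := by rw [← hdec', ← hdec]
  have huq := pvRightmost_unique hdd hc' hc
  rw [hlr, huq.1, huq.2]

theorem pvTokenLookup_some {b r : List Char} {o : String}
    (h : pvTokenOperatorsA.lookup (b ++ ['_', '_'] ++ r) = some o)
    (hc : ¬ (['_', '_'] : List Char) <:+: ('_' :: r)) :
    b = "token".toList ∧
      ((r = "gt".toList ∧ o = "TOKEN >") ∨ (r = "gte".toList ∧ o = "TOKEN >=") ∨
       (r = "lt".toList ∧ o = "TOKEN <") ∨ (r = "lte".toList ∧ o = "TOKEN <=")) := by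
  by_cases h1 : b ++ ['_', '_'] ++ r = "token__gt".toList
  · have hu := pvRightmost_unique (x2 := "token".toList) (y2 := "gt".toList)
        (h1.trans (by decide)) hc (by decide)
    refine ⟨hu.1, Or.inl ⟨hu.2, ?_⟩⟩
    rw [h1] at h
    rw [show pvTokenOperatorsA.lookup "token__gt".toList = some "TOKEN >" from by decide] at h
    exact (Option.some.inj h).symm
  ·
    by_cases h2 : b ++ ['_', '_'] ++ r = "token__gte".toList
    · have hu := pvRightmost_unique (x2 := "token".toList) (y2 := "gte".toList)
          (h2.trans (by decide)) hc (by decide)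
      refine ⟨hu.1, Or.inr (Or.inl ⟨hu.2, ?_⟩)⟩
      rw [h2] at h
      rw [show pvTokenOperatorsA.lookup "token__gte".toList = some "TOKEN >=" from by decide] at h
      exact (Option.some.inj h).symm
    ·
      by_cases h3 : b ++ ['_', '_'] ++ r = "token__lt".toList
      · have hu := pvRightmost_unique (x2 := "token".toList) (y2 := "lt".toList)
            (h3.trans (by decide)) hc (by decide)
        refine ⟨hu.1, Or.inr (Or.inr (Or.inl ⟨hu.2, ?_⟩))⟩
        rw [h3] at h
        rw [show pvTokenOperatorsA.lookup "token__lt".toList = some "TOKEN <" from by decide] at h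
        exact (Option.some.inj h).symm
      ·
        by_cases h4 : b ++ ['_', '_'] ++ r = "token__lte".toList
        · have hu := pvRightmost_unique (x2 := "token".toList) (y2 := "lte".toList)
              (h4.trans (by decide)) hc (by decide)
          refine ⟨hu.1, Or.inr (Or.inr (Or.inr ⟨hu.2, ?_⟩))⟩
          rw [h4] at h
          rw [show pvTokenOperatorsA.lookup "token__lte".toList = some "TOKEN <=" from by decide] at h
          exact (Option.some.inj h).symm
        ·
          exfalso
          have b1 : (b ++ ['_', '_'] ++ r == "token__gt".toList) = false := beq_eq_false_iff_ne.mpr h1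
          have b2 : (b ++ ['_', '_'] ++ r == "token__gte".toList) = false := beq_eq_false_iff_ne.mpr h2
          have b3 : (b ++ ['_', '_'] ++ r == "token__lt".toList) = false := beq_eq_false_iff_ne.mpr h3
          have b4 : (b ++ ['_', '_'] ++ r == "token__lte".toList) = false := beq_eq_false_iff_ne.mpr h4
          unfold pvTokenOperatorsA at h
          rw [List.lookup, b1, List.lookup, b2, List.lookup, b3, List.lookup, b4, List.lookup] at h
          simp at h

theorem pvOpLookup_none {r : List Char}
    (n1 : ¬ r = "gt".toList)
    (n2 : ¬ r = "gte".toList)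
    (n3 : ¬ r = "lt".toList)
    (n4 : ¬ r = "lte".toList)
    (n5 : ¬ r = "in".toList)
    (n6 : ¬ r = "contains_key".toList)
    (n7 : ¬ r = "contains".toList)
    (n8 : ¬ r = "like".toList)
    (n9 : ¬ r = "ne".toList)
    (n10 : ¬ r = "isnull".toList) :
    pvOperatorsA.lookup r = none := by
  have b1 : (r == "gt".toList) = false := beq_eq_false_iff_ne.mpr n1
  have b2 : (r == "gte".toList) = false := beq_eq_false_iff_ne.mpr n2
  have b3 : (r == "lt".toList) = false := beq_eq_false_iff_ne.mpr n3
  have b4 : (r == "lte".toList) = false := beq_eq_false_iff_ne.mpr n4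
  have b5 : (r == "in".toList) = false := beq_eq_false_iff_ne.mpr n5
  have b6 : (r == "contains_key".toList) = false := beq_eq_false_iff_ne.mpr n6
  have b7 : (r == "contains".toList) = false := beq_eq_false_iff_ne.mpr n7
  have b8 : (r == "like".toList) = false := beq_eq_false_iff_ne.mpr n8
  have b9 : (r == "ne".toList) = false := beq_eq_false_iff_ne.mpr n9
  have b10 : (r == "isnull".toList) = false := beq_eq_false_iff_ne.mpr n10
  unfold pvOperatorsA
  rw [List.lookup, b1, List.lookup, b2, List.lookup, b3, List.lookup, b4, List.lookup, b5, List.lookup, b7, List.lookup, b6, List.lookup, b8, List.lookup, b9, List.lookup, b10, List.lookup]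

-- A's row = B's row, for every key: case analysis on the first matching suffix pattern
theorem pvRow_eq (key : List Char) : pvRowA key = pvRowB pvPatternsB key := by
  cases e1 : PySem.Chars.endswith key "__token__gt".toList with
  | true =>
    obtain ⟨l, hl⟩ := (PySem.Chars.endswith_iff _ _).mp e1
    subst hl
    have hs1 : pvRsplit1 (l ++ "__token__gt".toList) = [l ++ "__token".toList, "gt".toList] :=
      pvRsplit1_of_decomp (by simp only [List.append_assoc]; exact congrArg (l ++ ·) (by decide)) (by decide)
    have hs2 : pvRsplit1 (l ++ "__token".toList) = [l, "token".toList] :=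
      pvRsplit1_of_decomp (by simp only [List.append_assoc]; exact congrArg (l ++ ·) (by decide)) (by decide)
    have hs3 : pvRsplit2 (l ++ "__token__gt".toList) = [l, "token".toList, "gt".toList] := by
      rw [pvRsplit2, hs1]; simp only [hs2]
    rw [pvRowA]
    simp only [hs3]
    rw [show pvTokenOperatorsA.lookup ("token".toList ++ ['_', '_'] ++ "gt".toList) = some "TOKEN >" from by decide]
    simp only [pvPatternsB, pvRowB, e1]
    simp
  | false =>
    cases e2 : PySem.Chars.endswith key "__token__gte".toList with
    | true =>
      obtain ⟨l, hl⟩ := (PySem.Chars.endswith_iff _ _).mp e2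
      subst hl
      have hs1 : pvRsplit1 (l ++ "__token__gte".toList) = [l ++ "__token".toList, "gte".toList] :=
        pvRsplit1_of_decomp (by simp only [List.append_assoc]; exact congrArg (l ++ ·) (by decide)) (by decide)
      have hs2 : pvRsplit1 (l ++ "__token".toList) = [l, "token".toList] :=
        pvRsplit1_of_decomp (by simp only [List.append_assoc]; exact congrArg (l ++ ·) (by decide)) (by decide)
      have hs3 : pvRsplit2 (l ++ "__token__gte".toList) = [l, "token".toList, "gte".toList] := by
        rw [pvRsplit2, hs1]; simp only [hs2]
      rw [pvRowA]
      simp only [hs3]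
      rw [show pvTokenOperatorsA.lookup ("token".toList ++ ['_', '_'] ++ "gte".toList) = some "TOKEN >=" from by decide]
      simp only [pvPatternsB, pvRowB, e1, e2]
      simp
    | false =>
      cases e3 : PySem.Chars.endswith key "__token__lt".toList with
      | true =>
        obtain ⟨l, hl⟩ := (PySem.Chars.endswith_iff _ _).mp e3
        subst hl
        have hs1 : pvRsplit1 (l ++ "__token__lt".toList) = [l ++ "__token".toList, "lt".toList] :=
          pvRsplit1_of_decomp (by simp only [List.append_assoc]; exact congrArg (l ++ ·) (by decide)) (by decide)
        have hs2 : pvRsplit1 (l ++ "__token".toList) = [l, "token".toList] :=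
          pvRsplit1_of_decomp (by simp only [List.append_assoc]; exact congrArg (l ++ ·) (by decide)) (by decide)
        have hs3 : pvRsplit2 (l ++ "__token__lt".toList) = [l, "token".toList, "lt".toList] := by
          rw [pvRsplit2, hs1]; simp only [hs2]
        rw [pvRowA]
        simp only [hs3]
        rw [show pvTokenOperatorsA.lookup ("token".toList ++ ['_', '_'] ++ "lt".toList) = some "TOKEN <" from by decide]
        simp only [pvPatternsB, pvRowB, e1, e2, e3]
        simp
      | false =>
        cases e4 : PySem.Chars.endswith key "__token__lte".toList with
        | true =>
          obtain ⟨l, hl⟩ := (PySem.Chars.endswith_iff _ _).mp e4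
          subst hl
          have hs1 : pvRsplit1 (l ++ "__token__lte".toList) = [l ++ "__token".toList, "lte".toList] :=
            pvRsplit1_of_decomp (by simp only [List.append_assoc]; exact congrArg (l ++ ·) (by decide)) (by decide)
          have hs2 : pvRsplit1 (l ++ "__token".toList) = [l, "token".toList] :=
            pvRsplit1_of_decomp (by simp only [List.append_assoc]; exact congrArg (l ++ ·) (by decide)) (by decide)
          have hs3 : pvRsplit2 (l ++ "__token__lte".toList) = [l, "token".toList, "lte".toList] := by
            rw [pvRsplit2, hs1]; simp only [hs2]
          rw [pvRowA]
          simp only [hs3]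
          rw [show pvTokenOperatorsA.lookup ("token".toList ++ ['_', '_'] ++ "lte".toList) = some "TOKEN <=" from by decide]
          simp only [pvPatternsB, pvRowB, e1, e2, e3, e4]
          simp
        | false =>
          cases e5 : PySem.Chars.endswith key "__gt".toList with
          | true =>
            obtain ⟨l, hl⟩ := (PySem.Chars.endswith_iff _ _).mp e5
            subst hl
            have hs1 : pvRsplit1 (l ++ "__gt".toList) = [l, "gt".toList] :=
              pvRsplit1_of_decomp (by simp only [List.append_assoc]; exact congrArg (l ++ ·) (by decide)) (by decide)
            by_cases hC : (['_', '_'] : List Char) <:+: l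
            · obtain ⟨a, b, hab⟩ := pvRsplit1_pair hC
              obtain ⟨hdec, hcond⟩ := pvRsplit1_spec hab
              have hs3 : pvRsplit2 (l ++ "__gt".toList) = [a, b, "gt".toList] := by
                rw [pvRsplit2, hs1]; simp only [hab]
              rw [pvRowA]
              simp only [hs3]
              cases htk : pvTokenOperatorsA.lookup (b ++ ['_', '_'] ++ "gt".toList) with
              | some o =>
                obtain ⟨hb, hdisj⟩ := pvTokenLookup_some htk (by decide)
                exfalso
                rcases hdisj with ⟨hr, ho⟩ | ⟨hr, ho⟩ | ⟨hr, ho⟩ | ⟨hr, ho⟩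
                · have hT : PySem.Chars.endswith (l ++ "__gt".toList) "__token__gt".toList = true :=
                    (PySem.Chars.endswith_iff _ _).mpr ⟨a, by
                      rw [hdec, hb]; simp only [List.append_assoc]; exact congrArg (a ++ ·) (by decide)⟩
                  rw [e1] at hT
                  exact absurd hT (by decide)
                · exact absurd hr (by decide)
                · exact absurd hr (by decide)
                · exact absurd hr (by decide)
              | none =>
                rw [pvRowAPlain, hs1]
                simp only [pvPatternsB, pvRowB, e1, e2, e3, e4, e5]
                simp [show List.lookup ['g', 't'] pvOperatorsA = some ">" from by decide]
            · have hs0 := pvRsplit1_no_sep hC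
              have hs3 : pvRsplit2 (l ++ "__gt".toList) = [l, "gt".toList] := by
                rw [pvRsplit2, hs1]; simp only [hs0]
              rw [pvRowA]
              simp only [hs3]
              rw [pvRowAPlain, hs1]
              simp only [pvPatternsB, pvRowB, e1, e2, e3, e4, e5]
              simp [show List.lookup ['g', 't'] pvOperatorsA = some ">" from by decide]
          | false =>
            cases e6 : PySem.Chars.endswith key "__gte".toList with
            | true =>
              obtain ⟨l, hl⟩ := (PySem.Chars.endswith_iff _ _).mp e6
              subst hl
              have hs1 : pvRsplit1 (l ++ "__gte".toList) = [l, "gte".toList] :=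
                pvRsplit1_of_decomp (by simp only [List.append_assoc]; exact congrArg (l ++ ·) (by decide)) (by decide)
              by_cases hC : (['_', '_'] : List Char) <:+: l
              · obtain ⟨a, b, hab⟩ := pvRsplit1_pair hC
                obtain ⟨hdec, hcond⟩ := pvRsplit1_spec hab
                have hs3 : pvRsplit2 (l ++ "__gte".toList) = [a, b, "gte".toList] := by
                  rw [pvRsplit2, hs1]; simp only [hab]
                rw [pvRowA]
                simp only [hs3]
                cases htk : pvTokenOperatorsA.lookup (b ++ ['_', '_'] ++ "gte".toList) with
                | some o =>
                  obtain ⟨hb, hdisj⟩ := pvTokenLookup_some htk (by decide)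
                  exfalso
                  rcases hdisj with ⟨hr, ho⟩ | ⟨hr, ho⟩ | ⟨hr, ho⟩ | ⟨hr, ho⟩
                  · exact absurd hr (by decide)
                  · have hT : PySem.Chars.endswith (l ++ "__gte".toList) "__token__gte".toList = true :=
                      (PySem.Chars.endswith_iff _ _).mpr ⟨a, by
                        rw [hdec, hb]; simp only [List.append_assoc]; exact congrArg (a ++ ·) (by decide)⟩
                    rw [e2] at hT
                    exact absurd hT (by decide)
                  · exact absurd hr (by decide)
                  · exact absurd hr (by decide)
                | none =>
                  rw [pvRowAPlain, hs1]
                  simp only [pvPatternsB, pvRowB, e1, e2, e3, e4, e5, e6]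
                  simp [show List.lookup ['g', 't', 'e'] pvOperatorsA = some ">=" from by decide]
              · have hs0 := pvRsplit1_no_sep hC
                have hs3 : pvRsplit2 (l ++ "__gte".toList) = [l, "gte".toList] := by
                  rw [pvRsplit2, hs1]; simp only [hs0]
                rw [pvRowA]
                simp only [hs3]
                rw [pvRowAPlain, hs1]
                simp only [pvPatternsB, pvRowB, e1, e2, e3, e4, e5, e6]
                simp [show List.lookup ['g', 't', 'e'] pvOperatorsA = some ">=" from by decide]
            | false =>
              cases e7 : PySem.Chars.endswith key "__lt".toList with
              | true =>
                obtain ⟨l, hl⟩ := (PySem.Chars.endswith_iff _ _).mp e7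
                subst hl
                have hs1 : pvRsplit1 (l ++ "__lt".toList) = [l, "lt".toList] :=
                  pvRsplit1_of_decomp (by simp only [List.append_assoc]; exact congrArg (l ++ ·) (by decide)) (by decide)
                by_cases hC : (['_', '_'] : List Char) <:+: l
                · obtain ⟨a, b, hab⟩ := pvRsplit1_pair hC
                  obtain ⟨hdec, hcond⟩ := pvRsplit1_spec hab
                  have hs3 : pvRsplit2 (l ++ "__lt".toList) = [a, b, "lt".toList] := by
                    rw [pvRsplit2, hs1]; simp only [hab]
                  rw [pvRowA]
                  simp only [hs3]
                  cases htk : pvTokenOperatorsA.lookup (b ++ ['_', '_'] ++ "lt".toList) with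
                  | some o =>
                    obtain ⟨hb, hdisj⟩ := pvTokenLookup_some htk (by decide)
                    exfalso
                    rcases hdisj with ⟨hr, ho⟩ | ⟨hr, ho⟩ | ⟨hr, ho⟩ | ⟨hr, ho⟩
                    · exact absurd hr (by decide)
                    · exact absurd hr (by decide)
                    · have hT : PySem.Chars.endswith (l ++ "__lt".toList) "__token__lt".toList = true :=
                        (PySem.Chars.endswith_iff _ _).mpr ⟨a, by
                          rw [hdec, hb]; simp only [List.append_assoc]; exact congrArg (a ++ ·) (by decide)⟩
                      rw [e3] at hT
                      exact absurd hT (by decide)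
                    · exact absurd hr (by decide)
                  | none =>
                    rw [pvRowAPlain, hs1]
                    simp only [pvPatternsB, pvRowB, e1, e2, e3, e4, e5, e6, e7]
                    simp [show List.lookup ['l', 't'] pvOperatorsA = some "<" from by decide]
                · have hs0 := pvRsplit1_no_sep hC
                  have hs3 : pvRsplit2 (l ++ "__lt".toList) = [l, "lt".toList] := by
                    rw [pvRsplit2, hs1]; simp only [hs0]
                  rw [pvRowA]
                  simp only [hs3]
                  rw [pvRowAPlain, hs1]
                  simp only [pvPatternsB, pvRowB, e1, e2, e3, e4, e5, e6, e7]
                  simp [show List.lookup ['l', 't'] pvOperatorsA = some "<" from by decide]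
              | false =>
                cases e8 : PySem.Chars.endswith key "__lte".toList with
                | true =>
                  obtain ⟨l, hl⟩ := (PySem.Chars.endswith_iff _ _).mp e8
                  subst hl
                  have hs1 : pvRsplit1 (l ++ "__lte".toList) = [l, "lte".toList] :=
                    pvRsplit1_of_decomp (by simp only [List.append_assoc]; exact congrArg (l ++ ·) (by decide)) (by decide)
                  by_cases hC : (['_', '_'] : List Char) <:+: l
                  · obtain ⟨a, b, hab⟩ := pvRsplit1_pair hC
                    obtain ⟨hdec, hcond⟩ := pvRsplit1_spec hab
                    have hs3 : pvRsplit2 (l ++ "__lte".toList) = [a, b, "lte".toList] := by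
                      rw [pvRsplit2, hs1]; simp only [hab]
                    rw [pvRowA]
                    simp only [hs3]
                    cases htk : pvTokenOperatorsA.lookup (b ++ ['_', '_'] ++ "lte".toList) with
                    | some o =>
                      obtain ⟨hb, hdisj⟩ := pvTokenLookup_some htk (by decide)
                      exfalso
                      rcases hdisj with ⟨hr, ho⟩ | ⟨hr, ho⟩ | ⟨hr, ho⟩ | ⟨hr, ho⟩
                      · exact absurd hr (by decide)
                      · exact absurd hr (by decide)
                      · exact absurd hr (by decide)
                      · have hT : PySem.Chars.endswith (l ++ "__lte".toList) "__token__lte".toList = true :=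
                          (PySem.Chars.endswith_iff _ _).mpr ⟨a, by
                            rw [hdec, hb]; simp only [List.append_assoc]; exact congrArg (a ++ ·) (by decide)⟩
                        rw [e4] at hT
                        exact absurd hT (by decide)
                    | none =>
                      rw [pvRowAPlain, hs1]
                      simp only [pvPatternsB, pvRowB, e1, e2, e3, e4, e5, e6, e7, e8]
                      simp [show List.lookup ['l', 't', 'e'] pvOperatorsA = some "<=" from by decide]
                  · have hs0 := pvRsplit1_no_sep hC
                    have hs3 : pvRsplit2 (l ++ "__lte".toList) = [l, "lte".toList] := by
                      rw [pvRsplit2, hs1]; simp only [hs0]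
                    rw [pvRowA]
                    simp only [hs3]
                    rw [pvRowAPlain, hs1]
                    simp only [pvPatternsB, pvRowB, e1, e2, e3, e4, e5, e6, e7, e8]
                    simp [show List.lookup ['l', 't', 'e'] pvOperatorsA = some "<=" from by decide]
                | false =>
                  cases e9 : PySem.Chars.endswith key "__in".toList with
                  | true =>
                    obtain ⟨l, hl⟩ := (PySem.Chars.endswith_iff _ _).mp e9
                    subst hl
                    have hs1 : pvRsplit1 (l ++ "__in".toList) = [l, "in".toList] :=
                      pvRsplit1_of_decomp (by simp only [List.append_assoc]; exact congrArg (l ++ ·) (by decide)) (by decide)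
                    by_cases hC : (['_', '_'] : List Char) <:+: l
                    · obtain ⟨a, b, hab⟩ := pvRsplit1_pair hC
                      obtain ⟨hdec, hcond⟩ := pvRsplit1_spec hab
                      have hs3 : pvRsplit2 (l ++ "__in".toList) = [a, b, "in".toList] := by
                        rw [pvRsplit2, hs1]; simp only [hab]
                      rw [pvRowA]
                      simp only [hs3]
                      cases htk : pvTokenOperatorsA.lookup (b ++ ['_', '_'] ++ "in".toList) with
                      | some o =>
                        obtain ⟨hb, hdisj⟩ := pvTokenLookup_some htk (by decide)
                        exfalso
                        rcases hdisj with ⟨hr, ho⟩ | ⟨hr, ho⟩ | ⟨hr, ho⟩ | ⟨hr, ho⟩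
                        · exact absurd hr (by decide)
                        · exact absurd hr (by decide)
                        · exact absurd hr (by decide)
                        · exact absurd hr (by decide)
                      | none =>
                        rw [pvRowAPlain, hs1]
                        simp only [pvPatternsB, pvRowB, e1, e2, e3, e4, e5, e6, e7, e8, e9]
                        simp [show List.lookup ['i', 'n'] pvOperatorsA = some "IN" from by decide]
                    · have hs0 := pvRsplit1_no_sep hC
                      have hs3 : pvRsplit2 (l ++ "__in".toList) = [l, "in".toList] := by
                        rw [pvRsplit2, hs1]; simp only [hs0]
                      rw [pvRowA]
                      simp only [hs3]
                      rw [pvRowAPlain, hs1]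
                      simp only [pvPatternsB, pvRowB, e1, e2, e3, e4, e5, e6, e7, e8, e9]
                      simp [show List.lookup ['i', 'n'] pvOperatorsA = some "IN" from by decide]
                  | false =>
                    cases e10 : PySem.Chars.endswith key "__contains_key".toList with
                    | true =>
                      obtain ⟨l, hl⟩ := (PySem.Chars.endswith_iff _ _).mp e10
                      subst hl
                      have hs1 : pvRsplit1 (l ++ "__contains_key".toList) = [l, "contains_key".toList] :=
                        pvRsplit1_of_decomp (by simp only [List.append_assoc]; exact congrArg (l ++ ·) (by decide)) (by decide)
                      by_cases hC : (['_', '_'] : List Char) <:+: l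
                      · obtain ⟨a, b, hab⟩ := pvRsplit1_pair hC
                        obtain ⟨hdec, hcond⟩ := pvRsplit1_spec hab
                        have hs3 : pvRsplit2 (l ++ "__contains_key".toList) = [a, b, "contains_key".toList] := by
                          rw [pvRsplit2, hs1]; simp only [hab]
                        rw [pvRowA]
                        simp only [hs3]
                        cases htk : pvTokenOperatorsA.lookup (b ++ ['_', '_'] ++ "contains_key".toList) with
                        | some o =>
                          obtain ⟨hb, hdisj⟩ := pvTokenLookup_some htk (by decide)
                          exfalso
                          rcases hdisj with ⟨hr, ho⟩ | ⟨hr, ho⟩ | ⟨hr, ho⟩ | ⟨hr, ho⟩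
                          · exact absurd hr (by decide)
                          · exact absurd hr (by decide)
                          · exact absurd hr (by decide)
                          · exact absurd hr (by decide)
                        | none =>
                          rw [pvRowAPlain, hs1]
                          simp only [pvPatternsB, pvRowB, e1, e2, e3, e4, e5, e6, e7, e8, e9, e10]
                          simp [show List.lookup ['c', 'o', 'n', 't', 'a', 'i', 'n', 's', '_', 'k', 'e', 'y'] pvOperatorsA = some "CONTAINS KEY" from by decide]
                      · have hs0 := pvRsplit1_no_sep hC
                        have hs3 : pvRsplit2 (l ++ "__contains_key".toList) = [l, "contains_key".toList] := by
                          rw [pvRsplit2, hs1]; simp only [hs0]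
                        rw [pvRowA]
                        simp only [hs3]
                        rw [pvRowAPlain, hs1]
                        simp only [pvPatternsB, pvRowB, e1, e2, e3, e4, e5, e6, e7, e8, e9, e10]
                        simp [show List.lookup ['c', 'o', 'n', 't', 'a', 'i', 'n', 's', '_', 'k', 'e', 'y'] pvOperatorsA = some "CONTAINS KEY" from by decide]
                    | false =>
                      cases e11 : PySem.Chars.endswith key "__contains".toList with
                      | true =>
                        obtain ⟨l, hl⟩ := (PySem.Chars.endswith_iff _ _).mp e11
                        subst hl
                        have hs1 : pvRsplit1 (l ++ "__contains".toList) = [l, "contains".toList] :=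
                          pvRsplit1_of_decomp (by simp only [List.append_assoc]; exact congrArg (l ++ ·) (by decide)) (by decide)
                        by_cases hC : (['_', '_'] : List Char) <:+: l
                        · obtain ⟨a, b, hab⟩ := pvRsplit1_pair hC
                          obtain ⟨hdec, hcond⟩ := pvRsplit1_spec hab
                          have hs3 : pvRsplit2 (l ++ "__contains".toList) = [a, b, "contains".toList] := by
                            rw [pvRsplit2, hs1]; simp only [hab]
                          rw [pvRowA]
                          simp only [hs3]
                          cases htk : pvTokenOperatorsA.lookup (b ++ ['_', '_'] ++ "contains".toList) with
                          | some o =>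
                            obtain ⟨hb, hdisj⟩ := pvTokenLookup_some htk (by decide)
                            exfalso
                            rcases hdisj with ⟨hr, ho⟩ | ⟨hr, ho⟩ | ⟨hr, ho⟩ | ⟨hr, ho⟩
                            · exact absurd hr (by decide)
                            · exact absurd hr (by decide)
                            · exact absurd hr (by decide)
                            · exact absurd hr (by decide)
                          | none =>
                            rw [pvRowAPlain, hs1]
                            simp only [pvPatternsB, pvRowB, e1, e2, e3, e4, e5, e6, e7, e8, e9, e10, e11]
                            simp [show List.lookup ['c', 'o', 'n', 't', 'a', 'i', 'n', 's'] pvOperatorsA = some "CONTAINS" from by decide]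
                        · have hs0 := pvRsplit1_no_sep hC
                          have hs3 : pvRsplit2 (l ++ "__contains".toList) = [l, "contains".toList] := by
                            rw [pvRsplit2, hs1]; simp only [hs0]
                          rw [pvRowA]
                          simp only [hs3]
                          rw [pvRowAPlain, hs1]
                          simp only [pvPatternsB, pvRowB, e1, e2, e3, e4, e5, e6, e7, e8, e9, e10, e11]
                          simp [show List.lookup ['c', 'o', 'n', 't', 'a', 'i', 'n', 's'] pvOperatorsA = some "CONTAINS" from by decide]
                      | false =>
                        cases e12 : PySem.Chars.endswith key "__like".toList with
                        | true =>
                          obtain ⟨l, hl⟩ := (PySem.Chars.endswith_iff _ _).mp e12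
                          subst hl
                          have hs1 : pvRsplit1 (l ++ "__like".toList) = [l, "like".toList] :=
                            pvRsplit1_of_decomp (by simp only [List.append_assoc]; exact congrArg (l ++ ·) (by decide)) (by decide)
                          by_cases hC : (['_', '_'] : List Char) <:+: l
                          · obtain ⟨a, b, hab⟩ := pvRsplit1_pair hC
                            obtain ⟨hdec, hcond⟩ := pvRsplit1_spec hab
                            have hs3 : pvRsplit2 (l ++ "__like".toList) = [a, b, "like".toList] := by
                              rw [pvRsplit2, hs1]; simp only [hab]
                            rw [pvRowA]
                            simp only [hs3]
                            cases htk : pvTokenOperatorsA.lookup (b ++ ['_', '_'] ++ "like".toList) with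
                            | some o =>
                              obtain ⟨hb, hdisj⟩ := pvTokenLookup_some htk (by decide)
                              exfalso
                              rcases hdisj with ⟨hr, ho⟩ | ⟨hr, ho⟩ | ⟨hr, ho⟩ | ⟨hr, ho⟩
                              · exact absurd hr (by decide)
                              · exact absurd hr (by decide)
                              · exact absurd hr (by decide)
                              · exact absurd hr (by decide)
                            | none =>
                              rw [pvRowAPlain, hs1]
                              simp only [pvPatternsB, pvRowB, e1, e2, e3, e4, e5, e6, e7, e8, e9, e10, e11, e12]
                              simp [show List.lookup ['l', 'i', 'k', 'e'] pvOperatorsA = some "LIKE" from by decide]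
                          · have hs0 := pvRsplit1_no_sep hC
                            have hs3 : pvRsplit2 (l ++ "__like".toList) = [l, "like".toList] := by
                              rw [pvRsplit2, hs1]; simp only [hs0]
                            rw [pvRowA]
                            simp only [hs3]
                            rw [pvRowAPlain, hs1]
                            simp only [pvPatternsB, pvRowB, e1, e2, e3, e4, e5, e6, e7, e8, e9, e10, e11, e12]
                            simp [show List.lookup ['l', 'i', 'k', 'e'] pvOperatorsA = some "LIKE" from by decide]
                        | false =>
                          cases e13 : PySem.Chars.endswith key "__ne".toList with
                          | true =>
                            obtain ⟨l, hl⟩ := (PySem.Chars.endswith_iff _ _).mp e13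
                            subst hl
                            have hs1 : pvRsplit1 (l ++ "__ne".toList) = [l, "ne".toList] :=
                              pvRsplit1_of_decomp (by simp only [List.append_assoc]; exact congrArg (l ++ ·) (by decide)) (by decide)
                            by_cases hC : (['_', '_'] : List Char) <:+: l
                            · obtain ⟨a, b, hab⟩ := pvRsplit1_pair hC
                              obtain ⟨hdec, hcond⟩ := pvRsplit1_spec hab
                              have hs3 : pvRsplit2 (l ++ "__ne".toList) = [a, b, "ne".toList] := by
                                rw [pvRsplit2, hs1]; simp only [hab]
                              rw [pvRowA]
                              simp only [hs3]
                              cases htk : pvTokenOperatorsA.lookup (b ++ ['_', '_'] ++ "ne".toList) with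
                              | some o =>
                                obtain ⟨hb, hdisj⟩ := pvTokenLookup_some htk (by decide)
                                exfalso
                                rcases hdisj with ⟨hr, ho⟩ | ⟨hr, ho⟩ | ⟨hr, ho⟩ | ⟨hr, ho⟩
                                · exact absurd hr (by decide)
                                · exact absurd hr (by decide)
                                · exact absurd hr (by decide)
                                · exact absurd hr (by decide)
                              | none =>
                                rw [pvRowAPlain, hs1]
                                simp only [pvPatternsB, pvRowB, e1, e2, e3, e4, e5, e6, e7, e8, e9, e10, e11, e12, e13]
                                simp [show List.lookup ['n', 'e'] pvOperatorsA = some "!=" from by decide]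
                            · have hs0 := pvRsplit1_no_sep hC
                              have hs3 : pvRsplit2 (l ++ "__ne".toList) = [l, "ne".toList] := by
                                rw [pvRsplit2, hs1]; simp only [hs0]
                              rw [pvRowA]
                              simp only [hs3]
                              rw [pvRowAPlain, hs1]
                              simp only [pvPatternsB, pvRowB, e1, e2, e3, e4, e5, e6, e7, e8, e9, e10, e11, e12, e13]
                              simp [show List.lookup ['n', 'e'] pvOperatorsA = some "!=" from by decide]
                          | false =>
                            cases e14 : PySem.Chars.endswith key "__isnull".toList with
                            | true =>
                              obtain ⟨l, hl⟩ := (PySem.Chars.endswith_iff _ _).mp e14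
                              subst hl
                              have hs1 : pvRsplit1 (l ++ "__isnull".toList) = [l, "isnull".toList] :=
                                pvRsplit1_of_decomp (by simp only [List.append_assoc]; exact congrArg (l ++ ·) (by decide)) (by decide)
                              by_cases hC : (['_', '_'] : List Char) <:+: l
                              · obtain ⟨a, b, hab⟩ := pvRsplit1_pair hC
                                obtain ⟨hdec, hcond⟩ := pvRsplit1_spec hab
                                have hs3 : pvRsplit2 (l ++ "__isnull".toList) = [a, b, "isnull".toList] := by
                                  rw [pvRsplit2, hs1]; simp only [hab]
                                rw [pvRowA]
                                simp only [hs3]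
                                cases htk : pvTokenOperatorsA.lookup (b ++ ['_', '_'] ++ "isnull".toList) with
                                | some o =>
                                  obtain ⟨hb, hdisj⟩ := pvTokenLookup_some htk (by decide)
                                  exfalso
                                  rcases hdisj with ⟨hr, ho⟩ | ⟨hr, ho⟩ | ⟨hr, ho⟩ | ⟨hr, ho⟩
                                  · exact absurd hr (by decide)
                                  · exact absurd hr (by decide)
                                  · exact absurd hr (by decide)
                                  · exact absurd hr (by decide)
                                | none =>
                                  rw [pvRowAPlain, hs1]
                                  simp only [pvPatternsB, pvRowB, e1, e2, e3, e4, e5, e6, e7, e8, e9, e10, e11, e12, e13, e14]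
                                  simp
                                  simp [show List.lookup ['i', 's', 'n', 'u', 'l', 'l'] pvOperatorsA = some "ISNULL" from by decide]
                              · have hs0 := pvRsplit1_no_sep hC
                                have hs3 : pvRsplit2 (l ++ "__isnull".toList) = [l, "isnull".toList] := by
                                  rw [pvRsplit2, hs1]; simp only [hs0]
                                rw [pvRowA]
                                simp only [hs3]
                                rw [pvRowAPlain, hs1]
                                simp only [pvPatternsB, pvRowB, e1, e2, e3, e4, e5, e6, e7, e8, e9, e10, e11, e12, e13, e14]
                                simp
                                simp [show List.lookup ['i', 's', 'n', 'u', 'l', 'l'] pvOperatorsA = some "ISNULL" from by decide]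
                            | false =>
                              -- no suffix pattern matches: both sides yield (key, "=")
                              have n1 : ∀ lx : List Char, key = lx ++ ['_', '_'] ++ "gt".toList → False := by
                                intro lx hx
                                have hT : PySem.Chars.endswith key "__gt".toList = true :=
                                  (PySem.Chars.endswith_iff _ _).mpr ⟨lx, by
                                    rw [hx]; simp only [List.append_assoc]; exact (congrArg (lx ++ ·) (by decide)).symm⟩
                                rw [e5] at hT
                                exact absurd hT (by decide)
                              have n2 : ∀ lx : List Char, key = lx ++ ['_', '_'] ++ "gte".toList → False := by
                                intro lx hx
                                have hT : PySem.Chars.endswith key "__gte".toList = true :=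
                                  (PySem.Chars.endswith_iff _ _).mpr ⟨lx, by
                                    rw [hx]; simp only [List.append_assoc]; exact (congrArg (lx ++ ·) (by decide)).symm⟩
                                rw [e6] at hT
                                exact absurd hT (by decide)
                              have n3 : ∀ lx : List Char, key = lx ++ ['_', '_'] ++ "lt".toList → False := by
                                intro lx hx
                                have hT : PySem.Chars.endswith key "__lt".toList = true :=
                                  (PySem.Chars.endswith_iff _ _).mpr ⟨lx, by
                                    rw [hx]; simp only [List.append_assoc]; exact (congrArg (lx ++ ·) (by decide)).symm⟩
                                rw [e7] at hT
                                exact absurd hT (by decide)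
                              have n4 : ∀ lx : List Char, key = lx ++ ['_', '_'] ++ "lte".toList → False := by
                                intro lx hx
                                have hT : PySem.Chars.endswith key "__lte".toList = true :=
                                  (PySem.Chars.endswith_iff _ _).mpr ⟨lx, by
                                    rw [hx]; simp only [List.append_assoc]; exact (congrArg (lx ++ ·) (by decide)).symm⟩
                                rw [e8] at hT
                                exact absurd hT (by decide)
                              have n5 : ∀ lx : List Char, key = lx ++ ['_', '_'] ++ "in".toList → False := by
                                intro lx hx
                                have hT : PySem.Chars.endswith key "__in".toList = true :=
                                  (PySem.Chars.endswith_iff _ _).mpr ⟨lx, by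
                                    rw [hx]; simp only [List.append_assoc]; exact (congrArg (lx ++ ·) (by decide)).symm⟩
                                rw [e9] at hT
                                exact absurd hT (by decide)
                              have n6 : ∀ lx : List Char, key = lx ++ ['_', '_'] ++ "contains_key".toList → False := by
                                intro lx hx
                                have hT : PySem.Chars.endswith key "__contains_key".toList = true :=
                                  (PySem.Chars.endswith_iff _ _).mpr ⟨lx, by
                                    rw [hx]; simp only [List.append_assoc]; exact (congrArg (lx ++ ·) (by decide)).symm⟩
                                rw [e10] at hT
                                exact absurd hT (by decide)
                              have n7 : ∀ lx : List Char, key = lx ++ ['_', '_'] ++ "contains".toList → False := by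
                                intro lx hx
                                have hT : PySem.Chars.endswith key "__contains".toList = true :=
                                  (PySem.Chars.endswith_iff _ _).mpr ⟨lx, by
                                    rw [hx]; simp only [List.append_assoc]; exact (congrArg (lx ++ ·) (by decide)).symm⟩
                                rw [e11] at hT
                                exact absurd hT (by decide)
                              have n8 : ∀ lx : List Char, key = lx ++ ['_', '_'] ++ "like".toList → False := by
                                intro lx hx
                                have hT : PySem.Chars.endswith key "__like".toList = true :=
                                  (PySem.Chars.endswith_iff _ _).mpr ⟨lx, by
                                    rw [hx]; simp only [List.append_assoc]; exact (congrArg (lx ++ ·) (by decide)).symm⟩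
                                rw [e12] at hT
                                exact absurd hT (by decide)
                              have n9 : ∀ lx : List Char, key = lx ++ ['_', '_'] ++ "ne".toList → False := by
                                intro lx hx
                                have hT : PySem.Chars.endswith key "__ne".toList = true :=
                                  (PySem.Chars.endswith_iff _ _).mpr ⟨lx, by
                                    rw [hx]; simp only [List.append_assoc]; exact (congrArg (lx ++ ·) (by decide)).symm⟩
                                rw [e13] at hT
                                exact absurd hT (by decide)
                              have n10 : ∀ lx : List Char, key = lx ++ ['_', '_'] ++ "isnull".toList → False := by
                                intro lx hx
                                have hT : PySem.Chars.endswith key "__isnull".toList = true :=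
                                  (PySem.Chars.endswith_iff _ _).mpr ⟨lx, by
                                    rw [hx]; simp only [List.append_assoc]; exact (congrArg (lx ++ ·) (by decide)).symm⟩
                                rw [e14] at hT
                                exact absurd hT (by decide)
                              by_cases hK : (['_', '_'] : List Char) <:+: key
                              · obtain ⟨lx, rx, hlr⟩ := pvRsplit1_pair hK
                                obtain ⟨hdec, hcond⟩ := pvRsplit1_spec hlr
                                have m1 : ¬ rx = "gt".toList := fun hx => n1 lx (by rw [hdec, hx])
                                have m2 : ¬ rx = "gte".toList := fun hx => n2 lx (by rw [hdec, hx])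
                                have m3 : ¬ rx = "lt".toList := fun hx => n3 lx (by rw [hdec, hx])
                                have m4 : ¬ rx = "lte".toList := fun hx => n4 lx (by rw [hdec, hx])
                                have m5 : ¬ rx = "in".toList := fun hx => n5 lx (by rw [hdec, hx])
                                have m6 : ¬ rx = "contains_key".toList := fun hx => n6 lx (by rw [hdec, hx])
                                have m7 : ¬ rx = "contains".toList := fun hx => n7 lx (by rw [hdec, hx])
                                have m8 : ¬ rx = "like".toList := fun hx => n8 lx (by rw [hdec, hx])
                                have m9 : ¬ rx = "ne".toList := fun hx => n9 lx (by rw [hdec, hx])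
                                have m10 : ¬ rx = "isnull".toList := fun hx => n10 lx (by rw [hdec, hx])
                                have hopn := pvOpLookup_none m1 m2 m3 m4 m5 m6 m7 m8 m9 m10
                                by_cases hL : (['_', '_'] : List Char) <:+: lx
                                · obtain ⟨a, b, hab⟩ := pvRsplit1_pair hL
                                  have hs3 : pvRsplit2 key = [a, b, rx] := by
                                    rw [pvRsplit2, hlr]; simp only [hab]
                                  rw [pvRowA]
                                  simp only [hs3]
                                  cases htk : pvTokenOperatorsA.lookup (b ++ ['_', '_'] ++ rx) with
                                  | some o =>
                                    obtain ⟨hb, hdisj⟩ := pvTokenLookup_some htk hcond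
                                    exfalso
                                    rcases hdisj with ⟨hr, ho⟩ | ⟨hr, ho⟩ | ⟨hr, ho⟩ | ⟨hr, ho⟩
                                    · exact absurd hr m1
                                    · exact absurd hr m2
                                    · exact absurd hr m3
                                    · exact absurd hr m4
                                  | none =>
                                    rw [pvRowAPlain, hlr]
                                    simp only [hopn, pvPatternsB, pvRowB, e1, e2, e3, e4, e5, e6, e7, e8, e9, e10, e11, e12, e13, e14]
                                    simp
                                · have hs0 := pvRsplit1_no_sep hL
                                  have hs3 : pvRsplit2 key = [lx, rx] := by
                                    rw [pvRsplit2, hlr]; simp only [hs0]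
                                  rw [pvRowA]
                                  simp only [hs3]
                                  rw [pvRowAPlain, hlr]
                                  simp only [hopn, pvPatternsB, pvRowB, e1, e2, e3, e4, e5, e6, e7, e8, e9, e10, e11, e12, e13, e14]
                                  simp
                              · have hs0 := pvRsplit1_no_sep hK
                                have hs3 : pvRsplit2 key = [key] := by
                                  rw [pvRsplit2]; simp only [hs0]
                                rw [pvRowA]
                                simp only [hs3]
                                rw [pvRowAPlain]
                                simp only [hs0]
                                simp only [pvPatternsB, pvRowB, e1, e2, e3, e4, e5, e6, e7, e8, e9, e10, e11, e12, e13, e14]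
                                simp

-- ===== VERDICT (by name: the statement is the Claim_ definition above) =====
theorem parse_filter_kwargs_spec : Claim_equal_parse_filter_kwargs := by
  intro kwargs hdom
  unfold Spec_parse_filter_kwargs
  clear hdom
  induction kwargs with
  | nil => rfl
  | cons kv rest ih =>
    obtain ⟨key, value⟩ := kv
    rw [parse_filter_kwargs, parse_filter_kwargs_alt, pvRow_eq, ih]
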